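-- pv_equiv track=rewrite | github.com/LowellInstruments/mat | mat/tap.py | _prf_build_indexes
-- ===== SOURCE A (Python) =====
-- def _prf_build_indexes(lp, full_res=False):
--     # lp: list of pressures
--     # pb: profile built
--     pb = list()
--     for i in range(len(lp) - 1):
--         if lp[i] < lp[i + 1]:
--             c = 'd_'
--         elif lp[i] > lp[i + 1]:
--             c = 'a_'
--         else:
--             c = 'e_'
--         if not full_res and pb and c in pb[-1]:
--             pb.pop()
--         pb.append('{}{}'.format(c, i + 1))
--     # pb: ['d_2', 'e_4', 'd_8', 'a_10']
--     return pb
-- ===== SOURCE B (Python) =====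
-- def _prf_build_indexes(lp, full_res=False):
--     # phase 1: direction of every step, paired with its end index
--     dirs = [('d' if lp[i] < lp[i + 1] else 'a' if lp[i] > lp[i + 1] else 'e', i + 1)
--             for i in range(len(lp) - 1)]
--     if full_res:
--         return ['{}_{}'.format(d, i) for d, i in dirs]
--     # phase 2: run-length-collapse, keeping the LAST index of each run
--     out = []
--     j = 0
--     n = len(dirs)
--     while j < n:
--         k = j
--         while k + 1 < n and dirs[k + 1][0] == dirs[j][0]:
--             k += 1
--         out.append('{}_{}'.format(dirs[j][0], dirs[k][1]))
--         j = k + 1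
--     return out
-- ===== Notes on version B (the rewrite author's own statement) =====
-- stated objective: alternative
-- what changed: B splits A's single fused pop/append loop into two separate phases: first build the full (direction, index) list for every adjacent pair, then (unless full_res) run-length-collapse consecutive equal directions keeping the last index of each run; A instead collapses inline by substring-testing and popping the previous entry.
import Mathlib
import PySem

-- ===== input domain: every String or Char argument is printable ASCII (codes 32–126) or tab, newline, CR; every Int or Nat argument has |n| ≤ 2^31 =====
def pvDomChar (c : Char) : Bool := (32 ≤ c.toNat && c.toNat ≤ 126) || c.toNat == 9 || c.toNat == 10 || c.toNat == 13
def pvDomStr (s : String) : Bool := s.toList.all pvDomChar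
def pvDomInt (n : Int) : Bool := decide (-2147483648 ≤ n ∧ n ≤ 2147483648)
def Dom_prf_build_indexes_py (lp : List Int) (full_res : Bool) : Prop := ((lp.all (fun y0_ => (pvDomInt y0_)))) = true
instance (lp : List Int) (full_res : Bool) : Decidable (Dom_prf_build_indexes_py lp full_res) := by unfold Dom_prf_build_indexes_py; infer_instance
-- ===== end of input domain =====

-- B separates 'compute the direction of every step' from 'run-length-collapse keeping the last
-- index of each run', instead of A's single fused loop that pops the previous entry; same values.

-- ===== PORT A =====
def prf_build_indexes_py (lp : List Int) (full_res : Bool) : List String :=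
  (PySem.List.pyRange 0 ((lp.length : Int) - 1) 1).foldl (fun pb i =>
    let c : String :=
      if PySem.List.pyGetD lp i 0 < PySem.List.pyGetD lp (i + 1) 0 then "d_"
      else if PySem.List.pyGetD lp i 0 > PySem.List.pyGetD lp (i + 1) 0 then "a_"
      else "e_"
    let pb :=
      if !full_res && !pb.isEmpty &&
          PySem.Str.isIn c ((PySem.List.pyGet? pb (-1)).getD "") then
        pb.dropLast  -- pb.pop() on the (guarded) nonempty list removes the last element
      else pb
    pb ++ [c ++ PySem.Int.toStr (i + 1)]) []

-- ===== PORT B =====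
-- phase 1 of Source B: the list comprehension building (direction, end index) pairs
def pvDirs (lp : List Int) : List (String × Int) :=
  (PySem.List.pyRange 0 ((lp.length : Int) - 1) 1).map (fun i =>
    ((if PySem.List.pyGetD lp i 0 < PySem.List.pyGetD lp (i + 1) 0 then "d"
      else if PySem.List.pyGetD lp i 0 > PySem.List.pyGetD lp (i + 1) 0 then "a"
      else "e"), i + 1))

-- '{}_{}'.format(d, i)
def pvFmt (d : String) (i : Int) : String := d ++ "_" ++ PySem.Int.toStr i

-- Source B's inner while loop: advance through the run of equal directions,
-- returning the run's last index and the unconsumed remainder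
def pvRun (d : String) (i : Int) : List (String × Int) → Int × List (String × Int)
  | [] => (i, [])
  | (d', j) :: rest => if d' == d then pvRun d j rest else (i, (d', j) :: rest)

theorem pvRun_snd_length_le (d : String) (i : Int) (l : List (String × Int)) :
    (pvRun d i l).2.length ≤ l.length := by
  induction l generalizing i with
  | nil => simp [pvRun]
  | cons p rest ih =>
    obtain ⟨d', j⟩ := p
    simp only [pvRun]
    split
    · exact le_trans (ih j) (Nat.le_succ _)
    · simp

-- Source B's outer while loop: one output entry per maximal run
def pvRLE : List (String × Int) → List String
  | [] => []
  | (d, i) :: rest =>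
    pvFmt d (pvRun d i rest).1 :: pvRLE (pvRun d i rest).2
termination_by l => l.length
decreasing_by simpa using Nat.lt_succ_of_le (pvRun_snd_length_le d i rest)

def prf_build_indexes_py_alt (lp : List Int) (full_res : Bool) : List String :=
  let dirs := pvDirs lp
  if full_res then dirs.map (fun p => pvFmt p.1 p.2)
  else pvRLE dirs

-- ===== PRECONDITION & SPEC =====
def Spec_prf_build_indexes_py (lp : List Int) (full_res : Bool) (out : List String) : Prop := out = prf_build_indexes_py_alt lp full_res
instance (lp : List Int) (full_res : Bool) (out : List String) : Decidable (Spec_prf_build_indexes_py lp full_res out) := by unfold Spec_prf_build_indexes_py; infer_instance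

-- ===== CLAIM (what is proved, stated in full; the proofs are below) =====
def Claim_equal_prf_build_indexes_py : Prop := ∀ (lp : List Int) (full_res : Bool), Dom_prf_build_indexes_py lp full_res → Spec_prf_build_indexes_py lp full_res (prf_build_indexes_py lp full_res)

-- ===== LEMMAS AND PROOFS =====

-- the loop body of A, phrased over a (direction, index) pair
def pvStepA (full_res : Bool) (pb : List String) (p : String × Int) : List String :=
  (if !full_res && !pb.isEmpty &&
      PySem.Str.isIn (p.1 ++ "_") ((PySem.List.pyGet? pb (-1)).getD "") then
    pb.dropLast
  else pb) ++ [pvFmt p.1 p.2]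

def pvWf (l : List (String × Int)) : Prop :=
  ∀ p ∈ l, (p.1 = "d" ∨ p.1 = "a" ∨ p.1 = "e") ∧ 1 ≤ p.2

theorem pvA_eq_foldl (lp : List Int) (full_res : Bool) :
    prf_build_indexes_py lp full_res = (pvDirs lp).foldl (pvStepA full_res) [] := by
  unfold prf_build_indexes_py pvDirs
  rw [List.foldl_map]
  congr 1
  funext pb i
  by_cases h1 : PySem.List.pyGetD lp i 0 < PySem.List.pyGetD lp (i + 1) 0
  · simp only [pvStepA, pvFmt, if_pos h1]; rfl
  · by_cases h2 : PySem.List.pyGetD lp i 0 > PySem.List.pyGetD lp (i + 1) 0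
    · simp only [pvStepA, pvFmt, if_neg h1, if_pos h2]; rfl
    · simp only [pvStepA, pvFmt, if_neg h1, if_neg h2]; rfl

theorem pvToChars_digits (k : Int) (hk : 1 ≤ k) :
    ∀ c ∈ PySem.Int.toChars k, c.isDigit = true := by
  intro c hc
  unfold PySem.Int.toChars at hc
  rw [if_neg (by omega)] at hc
  exact Nat.isDigit_of_mem_toDigits (by norm_num) (by norm_num) hc

theorem pvInfix_pair (x y : Char) (ds : List Char) (hx : x.isDigit = false) (hx2 : x ≠ '_')
    (hds : ∀ c ∈ ds, c.isDigit = true) : ([x, '_'] <:+: y :: '_' :: ds) ↔ x = y := by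
  constructor
  · intro h
    have hm : x ∈ y :: '_' :: ds := h.subset (by simp)
    rcases List.mem_cons.mp hm with h1 | h1
    · exact h1
    · rcases List.mem_cons.mp h1 with h2 | h2
      · exact absurd h2 hx2
      · exact absurd (hds x h2) (by simp [hx])
  · rintro rfl
    exact ⟨[], ds, rfl⟩

theorem pvIsIn_fmt_char (x y : Char) (k : Int) (hk : 1 ≤ k)
    (hx : x.isDigit = false) (hx2 : x ≠ '_') :
    PySem.Str.isIn (String.ofList [x] ++ "_") (String.ofList [y] ++ "_" ++ PySem.Int.toStr k)
      = (x == y) := by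
  have hds : ∀ c ∈ (PySem.Int.toStr k).toList, c.isDigit = true := by
    rw [PySem.Int.toList_toStr]; exact pvToChars_digits k hk
  rw [Bool.eq_iff_iff, PySem.Str.isIn_iff_infix, beq_iff_eq,
    show (String.ofList [x] ++ "_").toList = [x, '_'] from by simp,
    show (String.ofList [y] ++ "_" ++ PySem.Int.toStr k).toList
        = y :: '_' :: (PySem.Int.toStr k).toList from by simp]
  exact pvInfix_pair x y _ hx hx2 hds

theorem pvIsIn_fmt (x y : String) (k : Int)
    (hx : x = "d" ∨ x = "a" ∨ x = "e") (hy : y = "d" ∨ y = "a" ∨ y = "e") (hk : 1 ≤ k) :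
    PySem.Str.isIn (x ++ "_") (pvFmt y k) = (x == y) := by
  rcases hx with rfl | rfl | rfl <;> rcases hy with rfl | rfl | rfl <;>
    · simp only [pvFmt,
        show ("d" : String) = String.ofList ['d'] from rfl,
        show ("a" : String) = String.ofList ['a'] from rfl,
        show ("e" : String) = String.ofList ['e'] from rfl]
      rw [pvIsIn_fmt_char _ _ k hk (by decide) (by decide)]
      decide

theorem pvPyGet_neg_one {α : Type} (s : List α) (a : α) :
    PySem.List.pyGet? (s ++ [a]) (-1) = some a := by
  simp [PySem.List.pyGet?, PySem.List.pyIdx?]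

theorem pvRun_fst_ge (d : String) (i : Int) (l : List (String × Int)) (hl : pvWf l)
    (hi : 1 ≤ i) : 1 ≤ (pvRun d i l).1 := by
  induction l generalizing i with
  | nil => simpa [pvRun]
  | cons p rest ih =>
    obtain ⟨d', j⟩ := p
    simp only [pvRun]
    split
    · exact ih j (fun q hq => hl q (List.mem_cons_of_mem _ hq)) (hl (d', j) (by simp)).2
    · simpa

theorem pvRun_wf (d : String) (i : Int) (l : List (String × Int)) (hl : pvWf l) :
    pvWf (pvRun d i l).2 := by
  induction l generalizing i with
  | nil => simp [pvRun, pvWf]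
  | cons p rest ih =>
    obtain ⟨d', j⟩ := p
    simp only [pvRun]
    split
    · exact ih j (fun q hq => hl q (List.mem_cons_of_mem _ hq))
    · exact hl

theorem pvRun_snd_head (d : String) (i : Int) (l : List (String × Int)) :
    (pvRun d i l).2 = [] ∨
      ∃ d2 i2 r2, (pvRun d i l).2 = (d2, i2) :: r2 ∧ d2 ≠ d := by
  induction l generalizing i with
  | nil => simp [pvRun]
  | cons p rest ih =>
    obtain ⟨d', j⟩ := p
    simp only [pvRun]
    by_cases hdd : (d' == d) = true
    · rw [if_pos hdd]; exact ih j
    · rw [if_neg hdd]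
      exact Or.inr ⟨d', j, rest, rfl, fun h => hdd (beq_iff_eq.mpr h)⟩

theorem pvFoldRun (l : List (String × Int)) (d : String) (i : Int) (s : List String)
    (hd : d = "d" ∨ d = "a" ∨ d = "e") (hi : 1 ≤ i) (hl : pvWf l) :
    List.foldl (pvStepA false) (s ++ [pvFmt d i]) l
      = List.foldl (pvStepA false) (s ++ [pvFmt d (pvRun d i l).1]) (pvRun d i l).2 := by
  induction l generalizing i with
  | nil => simp [pvRun]
  | cons p rest ih =>
    obtain ⟨d', j⟩ := p
    have hp := hl (d', j) (by simp)
    simp only [pvRun]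
    by_cases hdd : (d' == d) = true
    · rw [if_pos hdd]
      have hstep : pvStepA false (s ++ [pvFmt d i]) (d', j) = s ++ [pvFmt d' j] := by
        simp only [pvStepA, pvPyGet_neg_one, Option.getD_some]
        rw [pvIsIn_fmt d' d i hp.1 hd hi, if_pos (by simp [hdd])]
        simp
      rw [List.foldl_cons, hstep, eq_of_beq hdd,
        ih j hp.2 (fun q hq => hl q (List.mem_cons_of_mem _ hq))]
    · rw [if_neg hdd]

theorem pvFoldRLE : ∀ (n : Nat) (l : List (String × Int)), l.length ≤ n → pvWf l →
    ∀ (s : List String) (d : String) (i : Int),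
      (d = "d" ∨ d = "a" ∨ d = "e") → 1 ≤ i →
      List.foldl (pvStepA false) (s ++ [pvFmt d i]) l
        = s ++ pvFmt d (pvRun d i l).1 :: pvRLE (pvRun d i l).2 := by
  intro n
  induction n with
  | zero =>
    intro l hn _ s d i _ _
    rw [List.length_eq_zero_iff.mp (Nat.le_zero.mp hn)]
    simp [pvRun, pvRLE]
  | succ n ih =>
    intro l hn hl s d i hd hi
    rw [pvFoldRun l d i s hd hi hl]
    rcases pvRun_snd_head d i l with h0 | ⟨d2, i2, r2, h0, hne⟩
    · rw [h0]; simp [pvRLE]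
    · have hwf2 : pvWf ((d2, i2) :: r2) := h0 ▸ pvRun_wf d i l hl
      have hp2 := hwf2 (d2, i2) (by simp)
      have hlen : r2.length ≤ n := by
        have := pvRun_snd_length_le d i l
        rw [h0] at this
        simp only [List.length_cons] at this
        omega
      rw [h0, List.foldl_cons]
      have hstep : pvStepA false (s ++ [pvFmt d (pvRun d i l).1]) (d2, i2)
          = (s ++ [pvFmt d (pvRun d i l).1]) ++ [pvFmt d2 i2] := by
        simp only [pvStepA, pvPyGet_neg_one, Option.getD_some]
        rw [pvIsIn_fmt d2 d (pvRun d i l).1 hp2.1 hd (pvRun_fst_ge d i l hl hi),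
          if_neg (by simp [hne])]
      rw [hstep, ih r2 hlen (fun q hq => hwf2 q (List.mem_cons_of_mem _ hq)) _ d2 i2 hp2.1 hp2.2]
      simp [pvRLE]

theorem pvWf_dirs (lp : List Int) : pvWf (pvDirs lp) := by
  intro p hp
  unfold pvDirs at hp
  rw [PySem.List.pyRange_of_pos 0 ((lp.length : Int) - 1) Int.zero_lt_one,
    List.map_map] at hp
  obtain ⟨k, -, rfl⟩ := List.mem_map.mp hp
  refine ⟨by simp only [Function.comp_apply]; split_ifs <;> simp, ?_⟩
  show (1 : Int) ≤ 0 + 1 * (k : Nat) + 1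
  omega

-- ===== VERDICT (by name: the statement is the Claim_ definition above) =====
theorem prf_build_indexes_py_spec : Claim_equal_prf_build_indexes_py := by
  intro lp full_res _
  unfold Spec_prf_build_indexes_py prf_build_indexes_py_alt
  rw [pvA_eq_foldl]
  cases full_res with
  | true =>
    simp only [if_pos]
    rw [show pvStepA true = fun pb p => pb ++ [pvFmt p.1 p.2] from by
      funext pb p; simp [pvStepA]]
    exact PySem.List.foldl_append_singleton_eq_map _ _ []
  | false =>
    simp only [Bool.false_eq_true, if_false]
    have hwf := pvWf_dirs lp
    cases hdirs : pvDirs lp with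
    | nil => simp [pvRLE]
    | cons p rest =>
      obtain ⟨d, i⟩ := p
      rw [hdirs] at hwf
      have hp := hwf (d, i) (by simp)
      have hstep : pvStepA false [] (d, i) = [] ++ [pvFmt d i] := by
        simp [pvStepA]
      rw [List.foldl_cons, hstep,
        pvFoldRLE rest.length rest le_rfl (fun q hq => hwf q (List.mem_cons_of_mem _ hq)) [] d i hp.1 hp.2]
      simp [pvRLE]
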